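-- pv_equiv track=rewrite | github.com/PrimeNodeSVX/PrimeNode_OPI0V1-Update | update_svx_full.py | sanitize_lines
-- ===== SOURCE A (Python) =====
-- def sanitize_lines(lines):
--     seen_headers = set()
--     clean_lines = []
--     skip_mode = False
--
--     for line in lines:
--         stripped = line.strip()
--         if stripped.startswith("[") and stripped.endswith("]"):
--             if stripped in seen_headers:
--                 skip_mode = True
--             else:
--                 seen_headers.add(stripped)
--                 skip_mode = False
--                 clean_lines.append(line)
--         else:
--             if not skip_mode:
--                 clean_lines.append(line)
--
--     final_lines = []
--     current_section = ""
--
--     for line in clean_lines: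
--         stripped = line.strip()
--         if stripped.startswith("[") and stripped.endswith("]"):
--             current_section = stripped
--             final_lines.append(line)
--             continue
--
--         if stripped.startswith("HOSTS=") or stripped.startswith("HOST_PORT="):
--             continue
--
--         if stripped.startswith("HOST=") or stripped.startswith("PORT="):
--             if current_section == "[ReflectorLogic]":
--                 final_lines.append(line)
--             else:
--                 pass
--         else:
--             final_lines.append(line)
--
--     return final_lines
-- ===== SOURCE B (Python) =====
-- def sanitize_lines(lines):
--     def is_header(l):
--         s = l.strip()
--         return s.startswith("[") and s.endswith("]")
--
--     def keep(l, sec):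
--         s = l.strip()
--         if s.startswith("HOSTS=") or s.startswith("HOST_PORT="):
--             return False
--         if s.startswith("HOST=") or s.startswith("PORT="):
--             return sec == "[ReflectorLogic]"
--         return True
--
--     def split_at_header(ls):
--         for k, l in enumerate(ls):
--             if is_header(l):
--                 return ls[:k], ls[k:]
--         return ls, []
--
--     # preamble before the first header, filtered with empty section
--     pre, rest = split_at_header(lines)
--     out = [l for l in pre if keep(l, "")]
--
--     # process whole header blocks at a time; a duplicate header drops its block wholesale
--     seen = set()
--     while rest:
--         head, tail = rest[0], rest[1:]
--         h = head.strip()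
--         body, rest = split_at_header(tail)
--         if h not in seen:
--             seen.add(h)
--             out.append(head)
--             out.extend(l for l in body if keep(l, h))
--     return out
-- ===== Notes on version B (the rewrite author's own statement) =====
-- stated objective: alternative
-- what changed: Instead of A's two line-by-line passes with skip_mode/current_section state, B splits the input into a preamble plus whole header blocks, drops a block wholesale when its header was already seen, and filters each surviving block's body with a single keep(line, section) predicate.
import Mathlib
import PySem

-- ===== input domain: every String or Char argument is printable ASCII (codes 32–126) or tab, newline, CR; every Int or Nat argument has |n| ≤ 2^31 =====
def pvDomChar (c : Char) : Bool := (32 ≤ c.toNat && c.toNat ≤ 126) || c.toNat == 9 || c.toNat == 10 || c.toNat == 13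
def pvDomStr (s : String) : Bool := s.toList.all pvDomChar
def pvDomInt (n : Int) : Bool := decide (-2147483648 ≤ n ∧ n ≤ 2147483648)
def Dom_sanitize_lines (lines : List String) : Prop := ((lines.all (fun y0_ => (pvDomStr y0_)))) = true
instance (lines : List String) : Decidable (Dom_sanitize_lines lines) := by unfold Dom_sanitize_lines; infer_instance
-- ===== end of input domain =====

-- B replaces A's two line-by-line passes (skip_mode pass, then section pass) by a block-at-a-time
-- decomposition: split into preamble + header blocks, drop duplicate-header blocks wholesale,
-- filter each surviving body with one keep(line, section) predicate; objective: alternative.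

-- ===== PORT A =====
-- first loop of A: drop lines under duplicate headers
def pvA_pass1 (seen : PySem.Set String) (skip : Bool) : List String → List String
  | [] => []
  | line :: rest =>
    let s := PySem.Str.strip line
    if PySem.Str.startswith s "[" && PySem.Str.endswith s "]" then
      if PySem.Set.contains seen s then pvA_pass1 seen true rest
      else line :: pvA_pass1 (PySem.Set.add seen s) false rest
    else
      if skip then pvA_pass1 seen skip rest
      else line :: pvA_pass1 seen skip rest

-- second loop of A: section-aware HOST/PORT filtering
def pvA_pass2 (sec : String) : List String → List String
  | [] => []
  | line :: rest =>
    let s := PySem.Str.strip line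
    if PySem.Str.startswith s "[" && PySem.Str.endswith s "]" then
      line :: pvA_pass2 s rest
    else if PySem.Str.startswith s "HOSTS=" || PySem.Str.startswith s "HOST_PORT=" then
      pvA_pass2 sec rest
    else if PySem.Str.startswith s "HOST=" || PySem.Str.startswith s "PORT=" then
      if sec == "[ReflectorLogic]" then line :: pvA_pass2 sec rest else pvA_pass2 sec rest
    else
      line :: pvA_pass2 sec rest

def sanitize_lines (lines : List String) : List String :=
  pvA_pass2 "" (pvA_pass1 PySem.Set.empty false lines)

-- ===== PORT B =====
-- is_header of Source B
def pvB_isHeader (l : String) : Bool :=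
  let s := PySem.Str.strip l
  PySem.Str.startswith s "[" && PySem.Str.endswith s "]"

-- keep of Source B
def pvB_keep (l : String) (sec : String) : Bool :=
  let s := PySem.Str.strip l
  if PySem.Str.startswith s "HOSTS=" || PySem.Str.startswith s "HOST_PORT=" then false
  else if PySem.Str.startswith s "HOST=" || PySem.Str.startswith s "PORT=" then sec == "[ReflectorLogic]"
  else true

-- split_at_header of Source B: (lines up to the first header, lines from the first header on)
def pvB_split (ls : List String) : List String × List String :=
  (ls.takeWhile (fun l => !pvB_isHeader l), ls.dropWhile (fun l => !pvB_isHeader l))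

-- the while-loop of Source B over whole blocks ('rest' always starts with a header)
def pvB_blocks (seen : PySem.Set String) : List String → List String
  | [] => []
  | head :: tail =>
    let h := PySem.Str.strip head
    let p := pvB_split tail
    if PySem.Set.contains seen h then pvB_blocks seen p.2
    else head :: (p.1.filter (fun l => pvB_keep l h) ++ pvB_blocks (PySem.Set.add seen h) p.2)
  termination_by ls => ls.length
  decreasing_by
    all_goals
    have h2 : (pvB_split tail).2 = tail.dropWhile (fun l => !pvB_isHeader l) := rfl
    have hle := List.length_dropWhile_le (fun l => !pvB_isHeader l) tail
    rw [h2]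
    simp only [List.length_cons]
    omega

def sanitize_lines_alt (lines : List String) : List String :=
  let p := pvB_split lines
  p.1.filter (fun l => pvB_keep l "") ++ pvB_blocks PySem.Set.empty p.2

-- ===== PRECONDITION & SPEC =====
def Spec_sanitize_lines (lines : List String) (out : List String) : Prop := out = sanitize_lines_alt lines
instance (lines : List String) (out : List String) : Decidable (Spec_sanitize_lines lines out) := by unfold Spec_sanitize_lines; infer_instance

-- ===== CLAIM (what is proved, stated in full; the proofs are below) =====
def Claim_equal_sanitize_lines : Prop := ∀ (lines : List String), Dom_sanitize_lines lines → Spec_sanitize_lines lines (sanitize_lines lines)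

-- ===== LEMMAS AND PROOFS =====

-- proof-side fused single pass with state (seen, skip, sec)
def pvF (seen : PySem.Set String) (skip : Bool) (sec : String) : List String → List String
  | [] => []
  | line :: rest =>
    let s := PySem.Str.strip line
    if PySem.Str.startswith s "[" && PySem.Str.endswith s "]" then
      if PySem.Set.contains seen s then pvF seen true sec rest
      else line :: pvF (PySem.Set.add seen s) false s rest
    else if skip then pvF seen skip sec rest
    else if PySem.Str.startswith s "HOSTS=" || PySem.Str.startswith s "HOST_PORT=" then
      pvF seen skip sec rest
    else if PySem.Str.startswith s "HOST=" || PySem.Str.startswith s "PORT=" then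
      if sec == "[ReflectorLogic]" then line :: pvF seen skip sec rest
      else pvF seen skip sec rest
    else
      line :: pvF seen skip sec rest

-- A's two passes compose to the fused pass
theorem pv_fuse (lines : List String) : ∀ (seen : PySem.Set String) (skip : Bool) (sec : String),
    pvA_pass2 sec (pvA_pass1 seen skip lines) = pvF seen skip sec lines := by
  induction lines with
  | nil => intro seen skip sec; rfl
  | cons line rest ih =>
    intro seen skip sec
    simp only [pvA_pass1, pvF]
    split_ifs with h1 h2 h3 <;> simp_all [pvA_pass2]

-- at a header line the fused pass ignores the skip flag
theorem pv_header_skip (seen : PySem.Set String) (sec line : String) (rest : List String)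
    (hh : (PySem.Str.startswith (PySem.Str.strip line) "[" &&
           PySem.Str.endswith (PySem.Str.strip line) "]") = true) :
    pvF seen true sec (line :: rest) = pvF seen false sec (line :: rest) := by
  simp only [pvF]
  rw [if_pos hh, if_pos hh]

-- with skip_mode on, the fused pass just skips to the next header
theorem pv_skip (ls : List String) : ∀ (seen : PySem.Set String) (sec : String),
    pvF seen true sec ls = pvF seen false sec (ls.dropWhile (fun l => !pvB_isHeader l)) := by
  induction ls with
  | nil => intro seen sec; rfl
  | cons line rest ih =>
    intro seen sec
    by_cases h : pvB_isHeader line = true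
    · have hd : (line :: rest).dropWhile (fun l => !pvB_isHeader l) = line :: rest := by
        simp [h]
      rw [hd, pv_header_skip _ _ _ _ h]
    · have h' : pvB_isHeader line = false := by simpa using h
      have hd : (line :: rest).dropWhile (fun l => !pvB_isHeader l)
          = rest.dropWhile (fun l => !pvB_isHeader l) := by
        simp [h']
      have hneg : ¬((PySem.Str.startswith (PySem.Str.strip line) "[" &&
                     PySem.Str.endswith (PySem.Str.strip line) "]") = true) := by
        simpa [pvB_isHeader] using h
      rw [hd, ← ih seen sec]
      simp only [pvF]
      rw [if_neg hneg, if_pos trivial]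

theorem pv_drop_idem (p : String → Bool) (ls : List String) :
    (ls.dropWhile p).takeWhile p = [] ∧ (ls.dropWhile p).dropWhile p = ls.dropWhile p := by
  induction ls with
  | nil => simp
  | cons l rest ih =>
    by_cases h : p l
    · simpa [List.dropWhile_cons, h] using ih
    · simp [h]

-- main correspondence: fused pass = filtered preamble ++ block loop
theorem pv_main : ∀ (n : ℕ) (ls : List String), ls.length ≤ n →
    ∀ (seen : PySem.Set String) (sec : String),
    pvF seen false sec ls =
      (ls.takeWhile (fun l => !pvB_isHeader l)).filter (fun l => pvB_keep l sec)
        ++ pvB_blocks seen (ls.dropWhile (fun l => !pvB_isHeader l)) := by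
  intro n
  induction n with
  | zero =>
    intro ls hls seen sec
    have : ls = [] := List.eq_nil_of_length_eq_zero (Nat.le_zero.mp hls)
    subst this; simp [pvF, pvB_blocks]
  | succ n ih =>
    intro ls hls seen sec
    cases ls with
    | nil => simp [pvF, pvB_blocks]
    | cons line rest =>
      by_cases h : pvB_isHeader line = true
      · -- header: preamble is empty and the block loop takes over
        have ht : (line :: rest).takeWhile (fun l => !pvB_isHeader l) = [] := by
          simp [h]
        have hd : (line :: rest).dropWhile (fun l => !pvB_isHeader l) = line :: rest := by
          simp [h]
        rw [ht, hd]
        simp only [List.filter_nil, List.nil_append]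
        have hh : (PySem.Str.startswith (PySem.Str.strip line) "[" &&
                   PySem.Str.endswith (PySem.Str.strip line) "]") = true := h
        by_cases hc : PySem.Set.contains seen (PySem.Str.strip line) = true
        · simp only [pvF, pvB_blocks, pvB_split]
          rw [if_pos hh, if_pos hc, if_pos hc, pv_skip]
          have hlen : (rest.dropWhile (fun l => !pvB_isHeader l)).length ≤ n := by
            have := List.length_dropWhile_le (fun l => !pvB_isHeader l) rest
            simp only [List.length_cons] at hls; omega
          rw [ih _ hlen seen sec]
          rcases pv_drop_idem (fun l => !pvB_isHeader l) rest with ⟨h1, h2⟩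
          rw [h1, h2, List.filter_nil, List.nil_append]
        · have hlen : rest.length ≤ n := by simp only [List.length_cons] at hls; omega
          simp only [pvF, pvB_blocks, pvB_split]
          rw [if_pos hh, if_neg hc, if_neg hc, ih _ hlen]
      · -- non-header line in the preamble: one filter step
        have h' : pvB_isHeader line = false := by simpa using h
        have ht : (line :: rest).takeWhile (fun l => !pvB_isHeader l)
            = line :: rest.takeWhile (fun l => !pvB_isHeader l) := by
          simp [h']
        have hd : (line :: rest).dropWhile (fun l => !pvB_isHeader l)
            = rest.dropWhile (fun l => !pvB_isHeader l) := by
          simp [h']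
        have hneg : ¬((PySem.Str.startswith (PySem.Str.strip line) "[" &&
                       PySem.Str.endswith (PySem.Str.strip line) "]") = true) := by
          simpa [pvB_isHeader] using h
        have hlen : rest.length ≤ n := by simp only [List.length_cons] at hls; omega
        have IH := ih rest hlen seen sec
        rw [ht, hd, List.filter_cons]
        simp only [pvF]
        rw [if_neg hneg, if_neg Bool.false_ne_true]
        by_cases c1 : (PySem.Str.startswith (PySem.Str.strip line) "HOSTS=" ||
                       PySem.Str.startswith (PySem.Str.strip line) "HOST_PORT=") = true
        · have hk : ¬(pvB_keep line sec = true) := by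
            simp only [pvB_keep]; rw [if_pos c1]; simp
          rw [if_pos c1, if_neg hk, IH]
        · by_cases c2 : (PySem.Str.startswith (PySem.Str.strip line) "HOST=" ||
                         PySem.Str.startswith (PySem.Str.strip line) "PORT=") = true
          · by_cases c3 : (sec == "[ReflectorLogic]") = true
            · have hk : pvB_keep line sec = true := by
                simp only [pvB_keep]; rw [if_neg c1, if_pos c2]; exact c3
              rw [if_neg c1, if_pos c2, if_pos c3, if_pos hk, IH, List.cons_append]
            · have hk : ¬(pvB_keep line sec = true) := by
                simp only [pvB_keep]; rw [if_neg c1, if_pos c2]; exact c3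
              rw [if_neg c1, if_pos c2, if_neg c3, if_neg hk, IH]
          · have hk : pvB_keep line sec = true := by
              simp only [pvB_keep]; rw [if_neg c1, if_neg c2]
            rw [if_neg c1, if_neg c2, if_pos hk, IH, List.cons_append]

-- ===== VERDICT (by name: the statement is the Claim_ definition above) =====
theorem sanitize_lines_spec : Claim_equal_sanitize_lines := by
  intro lines _
  unfold Spec_sanitize_lines sanitize_lines sanitize_lines_alt pvB_split
  rw [pv_fuse]
  exact pv_main lines.length lines le_rfl _ _
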